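-- pv_equiv track=rewrite | github.com/AmEr-Tinsley/Checker-Machine-Learning | PlayerAI.py | get
-- ===== SOURCE A (Python) =====
-- def get(xx,yy):
--     cnt = 0
--     for x in range(8):
--         for y in range(8):
--             if (x+y)%2==1:
--                 cnt+=1
--             if(x==yy and y == xx):
--                 return 33-cnt
-- ===== SOURCE B (Python) =====
-- def get(xx, yy):
--     # Closed-form count of dark squares up to (yy, xx) in row-major order.
--     if 0 <= yy < 8 and 0 <= xx < 8:
--         return 33 - (4 * yy + (xx + 1 + yy % 2) // 2)
--     return None
-- ===== Notes on version B (the rewrite author's own statement) =====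
-- stated objective: faster
-- what changed: Replaced the nested 8x8 scan with early return by a closed-form parity count: 4 dark squares per full row plus a parity count in the partial row.
import Mathlib
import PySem

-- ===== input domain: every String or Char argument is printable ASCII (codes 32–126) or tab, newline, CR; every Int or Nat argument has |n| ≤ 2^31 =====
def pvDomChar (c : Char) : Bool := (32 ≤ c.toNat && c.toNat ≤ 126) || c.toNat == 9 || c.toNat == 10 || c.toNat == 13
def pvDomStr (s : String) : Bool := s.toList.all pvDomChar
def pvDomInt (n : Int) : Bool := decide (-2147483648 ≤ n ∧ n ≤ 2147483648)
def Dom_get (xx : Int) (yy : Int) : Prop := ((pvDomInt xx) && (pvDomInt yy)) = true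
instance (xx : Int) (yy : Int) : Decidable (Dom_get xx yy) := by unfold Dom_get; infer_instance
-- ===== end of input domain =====

-- B replaces A's nested 8x8 scan with a closed-form parity count (objective: faster, O(1)).

-- ===== PORT A =====
-- inner 'for y in range(8)' loop: Sum.inl r = early 'return r', Sum.inr cnt = loop finished
def getInnerA (xx : Int) (yy : Int) (x : Int) : List Int → Int → Sum Int Int
  | [], cnt => Sum.inr cnt
  | y :: ys, cnt =>
    let cnt := if PySem.Int.mod (x + y) 2 == 1 then cnt + 1 else cnt
    if x == yy && y == xx then Sum.inl (33 - cnt)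
    else getInnerA xx yy x ys cnt

-- outer 'for x in range(8)' loop
def getOuterA (xx : Int) (yy : Int) : List Int → Int → Option Int
  | [], _ => none
  | x :: xs, cnt =>
    match getInnerA xx yy x (PySem.List.pyRange 0 8 1) cnt with
    | Sum.inl r => some r
    | Sum.inr cnt' => getOuterA xx yy xs cnt'

def get (xx : Int) (yy : Int) : Option Int :=
  getOuterA xx yy (PySem.List.pyRange 0 8 1) 0

-- ===== PORT B =====
def get_alt (xx : Int) (yy : Int) : Option Int :=
  if 0 ≤ yy ∧ yy < 8 ∧ 0 ≤ xx ∧ xx < 8 then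
    some (33 - (4 * yy + PySem.Int.floordiv (xx + 1 + PySem.Int.mod yy 2) 2))
  else none

-- ===== PRECONDITION & SPEC =====
def Spec_get (xx : Int) (yy : Int) (out : Option Int) : Prop := out = get_alt xx yy
instance (xx : Int) (yy : Int) (out : Option Int) : Decidable (Spec_get xx yy out) := by unfold Spec_get; infer_instance

-- ===== CLAIM (what is proved, stated in full; the proofs are below) =====
def Claim_equal_get : Prop := ∀ (xx : Int) (yy : Int), Dom_get xx yy → Spec_get xx yy (get xx yy)

-- ===== LEMMAS AND PROOFS =====

-- if the early-return test can never fire on the values of ys, the inner loop ends in Sum.inr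
theorem getInnerA_inr (xx yy x : Int) (ys : List Int)
    (h : ∀ y ∈ ys, ¬(x = yy ∧ y = xx)) :
    ∀ cnt : Int, ∃ c, getInnerA xx yy x ys cnt = Sum.inr c := by
  induction ys with
  | nil => intro cnt; exact ⟨cnt, rfl⟩
  | cons y ys ih =>
    intro cnt
    have hy := h y (List.mem_cons_self ..)
    have hrest : ∀ y' ∈ ys, ¬(x = yy ∧ y' = xx) := fun y' hy' => h y' (List.mem_cons_of_mem _ hy')
    simp only [getInnerA]
    have : (x == yy && y == xx) = false := by
      simpa using hy
    rw [this]
    simp only [Bool.false_eq_true, if_false]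
    exact ih hrest _

theorem getOuterA_none (xx yy : Int) (xs : List Int)
    (h : ∀ x ∈ xs, ∀ y ∈ PySem.List.pyRange 0 8 1, ¬(x = yy ∧ y = xx)) :
    ∀ cnt : Int, getOuterA xx yy xs cnt = none := by
  induction xs with
  | nil => intro cnt; rfl
  | cons x xs ih =>
    intro cnt
    obtain ⟨c, hc⟩ := getInnerA_inr xx yy x (PySem.List.pyRange 0 8 1)
      (h x (List.mem_cons_self ..)) cnt
    simp only [getOuterA, hc]
    exact ih (fun x' hx' => h x' (List.mem_cons_of_mem _ hx')) c

theorem pyRange8 : PySem.List.pyRange 0 8 1 = [0, 1, 2, 3, 4, 5, 6, 7] := by decide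

-- ===== VERDICT (by name: the statement is the Claim_ definition above) =====
theorem get_spec : Claim_equal_get := by
  intro xx yy _
  unfold Spec_get
  by_cases hin : 0 ≤ yy ∧ yy < 8 ∧ 0 ≤ xx ∧ xx < 8
  · obtain ⟨h1, h2, h3, h4⟩ := hin
    interval_cases yy <;> interval_cases xx <;> decide
  · have hnone : get xx yy = none := by
      apply getOuterA_none
      intro x hx y hy
      rw [pyRange8] at hx hy
      fin_cases hx <;> fin_cases hy <;> (intro ⟨e1, e2⟩; exact hin ⟨by omega, by omega, by omega, by omega⟩)
    rw [hnone, get_alt, if_neg hin]
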